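-- pv_equiv track=rewrite | github.com/soyukke/lean-unsolved | scripts/collatz_du_ratio.py | collatz_du_with_cycles
-- ===== SOURCE A (Python) =====
-- def collatz_du_with_cycles(n):
--     """
--     サイクル(連続上昇k回 + 下降v2回)ごとの情報を返す。
--     各サイクル: (k, v2) where k=連続奇数ステップ数, v2=その後の連続偶数ステップ数
--     """
--     cycles = []
--     x = n
--     while x != 1:
--         # 奇数フェーズ: 連続して 3x+1 → ÷2 (奇数の間続ける)
--         k = 0
--         while x != 1 and x % 2 == 1:
--             x = 3 * x + 1
--             k += 1
--             # 3x+1 は必ず偶数なので1回÷2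
--             x //= 2
--         # ここで x は偶数 or 1
--         # 追加の偶数ステップ
--         v2 = 0
--         while x != 1 and x % 2 == 0:
--             x //= 2
--             v2 += 1
--         # サイクル: 上昇k回(各回で÷2が1回含まれる)→追加下降v2回
--         # total d in cycle = k + v2, total u in cycle = k
--         if k > 0 or v2 > 0:
--             cycles.append((k, v2))
--     return cycles
-- ===== SOURCE B (Python) =====
-- def collatz_du_with_cycles(n):
--     """Two staged passes: first materialize the parity trajectory of the accelerated
--     Collatz map, then run-length-group it into (odd-run, even-run) cycle pairs."""
--     # stage 1: parity of x at each accelerated step (odd: x -> (3x+1)//2, even: x -> x//2)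
--     parities = []
--     x = n
--     while x != 1:
--         p = x % 2
--         parities.append(p)
--         x = (3 * x + 1) // 2 if p else x // 2
--     # stage 2: group the 1-runs with their following 0-runs
--     return _group(parities)
--
--
-- def _group(ps):
--     if not ps:
--         return []
--     k = 0
--     while k < len(ps) and ps[k] == 1:
--         k += 1
--     rest = ps[k:]
--     v2 = 0
--     while v2 < len(rest) and rest[v2] == 0:
--         v2 += 1
--     return [(k, v2)] + _group(rest[v2:])
-- ===== Notes on version B (the rewrite author's own statement) =====
-- stated objective: alternative
-- what changed: A interleaves grouping with the trajectory walk via nested phase whiles; B first materializes the parity list of the accelerated Collatz trajectory in one pass and then run-length-groups that list into (odd-run, even-run) pairs with a recursive second pass over the list.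
import Mathlib
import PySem

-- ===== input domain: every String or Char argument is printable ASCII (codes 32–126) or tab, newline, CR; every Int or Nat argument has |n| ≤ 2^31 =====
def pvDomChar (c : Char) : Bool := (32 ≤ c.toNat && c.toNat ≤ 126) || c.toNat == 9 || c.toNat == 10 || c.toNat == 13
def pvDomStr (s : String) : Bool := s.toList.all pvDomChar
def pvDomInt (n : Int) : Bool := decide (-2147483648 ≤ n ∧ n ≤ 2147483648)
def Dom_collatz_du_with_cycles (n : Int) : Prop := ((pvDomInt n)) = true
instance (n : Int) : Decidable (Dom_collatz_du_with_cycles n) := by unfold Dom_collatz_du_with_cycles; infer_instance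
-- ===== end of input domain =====

-- B replaces A's interleaved nested phase whiles by two staged passes: materialize the parity
-- trajectory, then run-length-group that list (objective: alternative, same cost).
-- Both Pythons' whiles are unbounded (termination on positives is Collatz); the ports carry the
-- same generous fuel counting x-updates, and equivalence is proved for EVERY fuel.

-- ===== PORT A =====
def pvFuel : Nat := 100000

-- inner while: odd phase (x = 3*x+1; k += 1; x //= 2), one fuel unit per iteration
def pvOdd : Nat → Int → Int → Nat × Int × Int
  | 0, x, k => (0, x, k)
  | f+1, x, k =>
    if x ≠ 1 ∧ PySem.Int.mod x 2 = 1 then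
      pvOdd f (PySem.Int.floordiv (3 * x + 1) 2) (k + 1)
    else (f+1, x, k)

-- inner while: even phase (x //= 2; v2 += 1), one fuel unit per iteration
def pvEven : Nat → Int → Int → Nat × Int × Int
  | 0, x, v2 => (0, x, v2)
  | f+1, x, v2 =>
    if x ≠ 1 ∧ PySem.Int.mod x 2 = 0 then
      pvEven f (PySem.Int.floordiv x 2) (v2 + 1)
    else (f+1, x, v2)

lemma pvOdd_fst_le : ∀ (f : Nat) (x k : Int), (pvOdd f x k).1 ≤ f := by
  intro f
  induction f with
  | zero => intro x k; simp [pvOdd]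
  | succ g ih =>
    intro x k
    rw [pvOdd]
    split
    · exact le_trans (ih _ _) (Nat.le_succ g)
    · exact le_refl _

lemma pvEven_fst_le : ∀ (f : Nat) (x v2 : Int), (pvEven f x v2).1 ≤ f := by
  intro f
  induction f with
  | zero => intro x v2; simp [pvEven]
  | succ g ih =>
    intro x v2
    rw [pvEven]
    split
    · exact le_trans (ih _ _) (Nat.le_succ g)
    · exact le_refl _

-- the port's outer while needs strict fuel decrease: each outer iteration does at least one x-update
lemma pvLoop_dec (f : Nat) (x : Int) (hx : ¬ x = 1) :
    (pvEven (pvOdd (f+1) x 0).1 (pvOdd (f+1) x 0).2.1 0).1 < f + 1 := by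
  rcases PySem.Int.mod_two_eq x with h | h
  · have hodd : pvOdd (f+1) x 0 = (f+1, x, 0) := by
      rw [pvOdd, if_neg]
      rintro ⟨-, h1⟩
      rw [h] at h1
      exact absurd h1 (by norm_num)
    rw [hodd]
    show (pvEven (f+1) x 0).1 < f + 1
    rw [pvEven, if_pos ⟨hx, h⟩]
    exact Nat.lt_succ_of_le (pvEven_fst_le _ _ _)
  · have h1 : (pvOdd (f+1) x 0).1 ≤ f := by
      rw [pvOdd, if_pos ⟨hx, h⟩]
      exact pvOdd_fst_le _ _ _
    exact Nat.lt_succ_of_le (le_trans (pvEven_fst_le _ _ _) h1)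

-- outer while of A
def pvLoop : Nat → Int → List (Int × Int) → List (Int × Int)
  | 0, _, acc => acc
  | f+1, x, acc =>
    if hx : x = 1 then acc
    else
      let r1 := pvOdd (f+1) x 0
      let k := r1.2.2
      let r2 := pvEven r1.1 r1.2.1 0
      let v2 := r2.2.2
      let acc' := if 0 < k ∨ 0 < v2 then acc ++ [(k, v2)] else acc
      pvLoop r2.1 r2.2.1 acc'
  termination_by f _ _ => f
  decreasing_by exact pvLoop_dec _ _ hx

def collatz_du_with_cycles (n : Int) : List (Int × Int) := pvLoop pvFuel n []

-- ===== PORT B =====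
-- stage 1: the parity trajectory of the accelerated map, one fuel unit per x-update
def pvTraj : Nat → Int → List Int
  | 0, _ => []
  | f+1, x =>
    if x = 1 then []
    else (PySem.Int.mod x 2) ::
      pvTraj f (if PySem.Int.mod x 2 ≠ 0 then PySem.Int.floordiv (3 * x + 1) 2
                else PySem.Int.floordiv x 2)

-- 'while k < len(ps) and ps[k] == 1: k += 1' = count of leading 1s
def pvLead1 : List Int → Nat
  | [] => 0
  | p :: ps => if p = 1 then pvLead1 ps + 1 else 0

-- 'while v2 < len(rest) and rest[v2] == 0: v2 += 1' = count of leading 0s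
def pvLead0 : List Int → Nat
  | [] => 0
  | p :: ps => if p = 0 then pvLead0 ps + 1 else 0

-- stage 2: _group; the dite is a pure totality guard (always true on 0/1 lists, which is all
-- the Python helper is ever applied to)
def pvGroup : List Int → List (Int × Int)
  | [] => []
  | p :: ps =>
    let k := pvLead1 (p :: ps)
    let rest := (p :: ps).drop k
    let v2 := pvLead0 rest
    let rest2 := rest.drop v2
    if h : rest2.length < (p :: ps).length then ((k : Int), (v2 : Int)) :: pvGroup rest2
    else [((k : Int), (v2 : Int))]
  termination_by l => l.length
  decreasing_by
    simp only [k, rest, v2, rest2, List.length_drop, List.length_cons] at h ⊢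
    omega

def collatz_du_with_cycles_alt (n : Int) : List (Int × Int) := pvGroup (pvTraj pvFuel n)

-- ===== PRECONDITION & SPEC =====
def Spec_collatz_du_with_cycles (n : Int) (out : List (Int × Int)) : Prop :=
  out = collatz_du_with_cycles_alt n
instance (n : Int) (out : List (Int × Int)) : Decidable (Spec_collatz_du_with_cycles n out) := by
  unfold Spec_collatz_du_with_cycles; infer_instance

-- ===== CLAIM =====
def Claim_equal_collatz_du_with_cycles : Prop :=
  ∀ (n : Int), Dom_collatz_du_with_cycles n →
    Spec_collatz_du_with_cycles n (collatz_du_with_cycles n)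

-- ===== LEMMAS AND PROOFS =====

-- one-step unfolding lemmas for A's phases
lemma pvOdd_stop {x : Int} (f : Nat) (k : Int) (h : ¬ (x ≠ 1 ∧ PySem.Int.mod x 2 = 1)) :
    pvOdd (f+1) x k = (f+1, x, k) := by rw [pvOdd, if_neg h]

lemma pvOdd_step {x : Int} (hx : ¬ x = 1) (h : PySem.Int.mod x 2 = 1) (f : Nat) (k : Int) :
    pvOdd (f+1) x k = pvOdd f (PySem.Int.floordiv (3 * x + 1) 2) (k + 1) := by
  rw [pvOdd, if_pos ⟨hx, h⟩]

lemma pvEven_stop {x : Int} (f : Nat) (v2 : Int) (h : ¬ (x ≠ 1 ∧ PySem.Int.mod x 2 = 0)) :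
    pvEven (f+1) x v2 = (f+1, x, v2) := by rw [pvEven, if_neg h]

lemma pvEven_step {x : Int} (hx : ¬ x = 1) (h : PySem.Int.mod x 2 = 0) (f : Nat) (v2 : Int) :
    pvEven (f+1) x v2 = pvEven f (PySem.Int.floordiv x 2) (v2 + 1) := by
  rw [pvEven, if_pos ⟨hx, h⟩]

-- phases exit (with fuel left) only at 1 or at the opposite parity
lemma pvOdd_exit : ∀ (f : Nat) (x k : Int), 0 < (pvOdd f x k).1 →
    (pvOdd f x k).2.1 = 1 ∨ PySem.Int.mod (pvOdd f x k).2.1 2 = 0 := by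
  intro f
  induction f with
  | zero => intro x k h; simp [pvOdd] at h
  | succ g ih =>
    intro x k h
    by_cases hc : x ≠ 1 ∧ PySem.Int.mod x 2 = 1
    · rw [pvOdd_step hc.1 hc.2] at h ⊢
      exact ih _ _ h
    · rw [pvOdd_stop _ _ hc]
      by_cases hx : x = 1
      · exact Or.inl hx
      · rcases PySem.Int.mod_two_eq x with he | ho
        · exact Or.inr he
        · exact absurd ⟨hx, ho⟩ hc

lemma pvEven_exit : ∀ (f : Nat) (x v2 : Int), 0 < (pvEven f x v2).1 →
    (pvEven f x v2).2.1 = 1 ∨ PySem.Int.mod (pvEven f x v2).2.1 2 = 1 := by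
  intro f
  induction f with
  | zero => intro x v2 h; simp [pvEven] at h
  | succ g ih =>
    intro x v2 h
    by_cases hc : x ≠ 1 ∧ PySem.Int.mod x 2 = 0
    · rw [pvEven_step hc.1 hc.2] at h ⊢
      exact ih _ _ h
    · rw [pvEven_stop _ _ hc]
      by_cases hx : x = 1
      · exact Or.inl hx
      · rcases PySem.Int.mod_two_eq x with he | ho
        · exact absurd ⟨hx, he⟩ hc
        · exact Or.inr ho

-- the counters never decrease
lemma pvOdd_k_le : ∀ (f : Nat) (x k : Int), k ≤ (pvOdd f x k).2.2 := by
  intro f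
  induction f with
  | zero => intro x k; simp [pvOdd]
  | succ g ih =>
    intro x k
    rw [pvOdd]
    split
    · exact le_trans (by omega) (ih _ (k + 1))
    · exact le_refl _

lemma pvEven_v2_le : ∀ (f : Nat) (x v2 : Int), v2 ≤ (pvEven f x v2).2.2 := by
  intro f
  induction f with
  | zero => intro x v2; simp [pvEven]
  | succ g ih =>
    intro x v2
    rw [pvEven]
    split
    · exact le_trans (by omega) (ih _ (v2 + 1))
    · exact le_refl _

lemma pvEven_v2_pos (f : Nat) (x : Int) (hx : ¬ x = 1) (h : PySem.Int.mod x 2 = 0) :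
    0 < (pvEven (f+1) x 0).2.2 := by
  rw [pvEven_step hx h]
  have := pvEven_v2_le f (PySem.Int.floordiv x 2) (0 + 1)
  omega

-- A's odd phase walks exactly a 1-run of the trajectory
lemma pvOdd_traj : ∀ (f : Nat) (x k0 : Int), ∃ m : Nat,
    (pvOdd f x k0).2.2 = k0 + (m : Int) ∧
    pvTraj f x = List.replicate m 1 ++ pvTraj (pvOdd f x k0).1 (pvOdd f x k0).2.1 := by
  intro f
  induction f with
  | zero => intro x k0; exact ⟨0, by simp [pvOdd, pvTraj]⟩
  | succ g ih =>
    intro x k0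
    by_cases hc : x ≠ 1 ∧ PySem.Int.mod x 2 = 1
    · obtain ⟨m, hm, ht⟩ := ih (PySem.Int.floordiv (3 * x + 1) 2) (k0 + 1)
      refine ⟨m + 1, ?_, ?_⟩
      · rw [pvOdd_step hc.1 hc.2, hm]; push_cast; ring
      · rw [pvOdd_step hc.1 hc.2, pvTraj, if_neg hc.1, if_pos (by rw [hc.2]; norm_num), hc.2, ht]
        simp [List.replicate_succ]
    · exact ⟨0, by rw [pvOdd_stop _ _ hc]; simp⟩

-- A's even phase walks exactly a 0-run of the trajectory
lemma pvEven_traj : ∀ (f : Nat) (x v0 : Int), ∃ m : Nat,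
    (pvEven f x v0).2.2 = v0 + (m : Int) ∧
    pvTraj f x = List.replicate m 0 ++ pvTraj (pvEven f x v0).1 (pvEven f x v0).2.1 := by
  intro f
  induction f with
  | zero => intro x v0; exact ⟨0, by simp [pvEven, pvTraj]⟩
  | succ g ih =>
    intro x v0
    by_cases hc : x ≠ 1 ∧ PySem.Int.mod x 2 = 0
    · obtain ⟨m, hm, ht⟩ := ih (PySem.Int.floordiv x 2) (v0 + 1)
      refine ⟨m + 1, ?_, ?_⟩
      · rw [pvEven_step hc.1 hc.2, hm]; push_cast; ring
      · rw [pvEven_step hc.1 hc.2, pvTraj, if_neg hc.1, if_neg (by rw [hc.2]; norm_num), hc.2, ht]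
        simp [List.replicate_succ]
    · exact ⟨0, by rw [pvEven_stop _ _ hc]; simp⟩

-- leading-run counts over a run-shaped list
lemma pvLead1_rep (m : Nat) (l : List Int) :
    pvLead1 (List.replicate m 1 ++ l) = m + pvLead1 l := by
  induction m with
  | zero => simp
  | succ k ih => simp [List.replicate_succ, pvLead1, ih]; omega

lemma pvLead0_rep (m : Nat) (l : List Int) :
    pvLead0 (List.replicate m 0 ++ l) = m + pvLead0 l := by
  induction m with
  | zero => simp
  | succ k ih => simp [List.replicate_succ, pvLead0, ih]; omega

lemma pvLead0_nil_or_one (l : List Int) (h : l = [] ∨ ∃ t, l = 1 :: t) : pvLead0 l = 0 := by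
  rcases h with rfl | ⟨t, rfl⟩
  · rfl
  · simp [pvLead0]

lemma pvGroup_nil : pvGroup [] = [] := by rw [pvGroup]

lemma pvGroup_cons_eq (p : Int) (ps : List Int) :
    pvGroup (p :: ps) =
      (if (((p :: ps).drop (pvLead1 (p :: ps))).drop
            (pvLead0 ((p :: ps).drop (pvLead1 (p :: ps))))).length < (p :: ps).length
       then ((pvLead1 (p :: ps) : Int), (pvLead0 ((p :: ps).drop (pvLead1 (p :: ps))) : Int)) ::
              pvGroup (((p :: ps).drop (pvLead1 (p :: ps))).drop
                (pvLead0 ((p :: ps).drop (pvLead1 (p :: ps)))))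
       else [((pvLead1 (p :: ps) : Int), (pvLead0 ((p :: ps).drop (pvLead1 (p :: ps))) : Int))]) := by
  rw [pvGroup]
  simp

-- one grouping step of B on a (1-run ++ 0-run ++ rest) list
lemma pvGroup_cons (mk mv : Nat) (rest : List Int) (hpos : 0 < mk + mv)
    (hrest : rest = [] ∨ ∃ t, rest = 1 :: t) (hmv : rest ≠ [] → 0 < mv) :
    pvGroup (List.replicate mk 1 ++ List.replicate mv 0 ++ rest)
      = ((mk : Int), (mv : Int)) :: pvGroup rest := by
  have hL1 : pvLead1 (List.replicate mk 1 ++ (List.replicate mv 0 ++ rest)) = mk := by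
    rw [pvLead1_rep]
    have : pvLead1 (List.replicate mv 0 ++ rest) = 0 := by
      cases mv with
      | zero =>
        have hr : rest = [] := by
          by_contra h; exact absurd (hmv h) (by omega)
        simp [hr, pvLead1]
      | succ k => simp [List.replicate_succ, pvLead1]
    omega
  have hL0 : pvLead0 (List.replicate mv 0 ++ rest) = mv := by
    rw [pvLead0_rep, pvLead0_nil_or_one rest hrest]
    omega
  obtain ⟨p, ps, hcons⟩ :
      ∃ p ps, List.replicate mk 1 ++ List.replicate mv 0 ++ rest = p :: ps := by
    cases mk with
    | zero =>
      cases mv with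
      | zero => omega
      | succ k => exact ⟨0, List.replicate k 0 ++ rest, by simp [List.replicate_succ]⟩
    | succ k => exact ⟨1, List.replicate k 1 ++ List.replicate mv 0 ++ rest, by
        simp [List.replicate_succ]⟩
  have hdropk : List.drop mk (List.replicate mk 1 ++ (List.replicate mv 0 ++ rest))
      = List.replicate mv 0 ++ rest := by
    have := @List.drop_left _ (List.replicate mk 1) (List.replicate mv 0 ++ rest)
    simpa using this
  have hdropv : List.drop mv (List.replicate mv 0 ++ rest) = rest := by
    have := @List.drop_left _ (List.replicate mv 0) rest
    simpa using this
  rw [List.append_assoc] at hcons ⊢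
  rw [hcons, pvGroup_cons_eq, ← hcons, hL1, hdropk, hL0, hdropv]
  rw [if_pos (by simp; omega)]

-- MAIN: A's interleaved loop equals B's group-of-trajectory, for every fuel and accumulator
lemma pvMain : ∀ (f : Nat) (x : Int) (acc : List (Int × Int)),
    pvLoop f x acc = acc ++ pvGroup (pvTraj f x) := by
  intro f
  induction f using Nat.strong_induction_on with
  | _ f ih =>
    intro x acc
    match f with
    | 0 => simp [pvLoop, pvTraj, pvGroup_nil]
    | g+1 =>
      by_cases hx : x = 1
      · subst hx
        rw [pvLoop, dif_pos rfl, pvTraj, if_pos rfl]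
        simp [pvGroup_nil]
      · have hdec := pvLoop_dec g x hx
        rw [pvLoop, dif_neg hx]
        obtain ⟨mk, hmk, htk⟩ := pvOdd_traj (g+1) x 0
        obtain ⟨mv, hmv, htv⟩ := pvEven_traj (pvOdd (g+1) x 0).1 (pvOdd (g+1) x 0).2.1 0
        rcases h1 : pvOdd (g+1) x 0 with ⟨f1, x1, kk⟩
        rcases h2 : pvEven f1 x1 0 with ⟨f2, x2, vv⟩
        rw [h1] at hmk htk hmv htv hdec
        rw [h2] at hmv htv hdec
        dsimp only at hmk htk hmv htv hdec ⊢
        rw [h2]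
        dsimp only
        -- facts about the cycle just walked
        have hpos : 0 < mk + mv := by
          rcases PySem.Int.mod_two_eq x with he | ho
          · -- x even: the odd phase is a no-op, the even phase counts at least once
            have hodd : pvOdd (g+1) x 0 = (g+1, x, 0) := by
              refine pvOdd_stop _ _ ?_
              rintro ⟨-, h'⟩; rw [he] at h'; exact absurd h' (by norm_num)
            rw [h1] at hodd
            obtain ⟨hf1, hx1, -⟩ : f1 = g + 1 ∧ x1 = x ∧ kk = 0 := by
              injection hodd with a b; injection b with b c; exact ⟨a, b, c⟩
            have := pvEven_v2_pos g x hx he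
            rw [← hf1, ← hx1, h2] at this
            simp at this
            omega
          · -- x odd: the odd phase counts at least once
            have : (0 : Int) + 1 ≤ kk := by
              have h' := pvOdd_k_le g (PySem.Int.floordiv (3 * x + 1) 2) ((0 : Int) + 1)
              rw [← pvOdd_step hx ho, h1] at h'
              exact h'
            omega
        have hrest : pvTraj f2 x2 = [] ∨ ∃ t, pvTraj f2 x2 = 1 :: t := by
          match f2, h2 with
          | 0, _ => exact Or.inl rfl
          | m+1, h2 =>
            by_cases hx2 : x2 = 1
            · exact Or.inl (by rw [pvTraj, if_pos hx2])
            · have hex := pvEven_exit f1 x1 0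
              rw [h2] at hex
              have ho2 : PySem.Int.mod x2 2 = 1 := (hex (by omega)).resolve_left hx2
              exact Or.inr ⟨_, by rw [pvTraj, if_neg hx2, ho2]⟩
        have hmvpos : pvTraj f2 x2 ≠ [] → 0 < mv := by
          intro hne
          have hf2 : 0 < f2 := by
            cases f2 with
            | zero => exact absurd rfl hne
            | succ m => exact Nat.succ_pos m
          have hx2 : x2 ≠ 1 := by
            intro h'
            apply hne
            cases f2 with
            | zero => rfl
            | succ m => rw [pvTraj, if_pos h']
          have hf1 : 0 < f1 := lt_of_lt_of_le hf2 (by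
            have := pvEven_fst_le f1 x1 0
            rw [h2] at this
            exact this)
          have hx1 : x1 ≠ 1 := by
            intro h'
            subst h'
            obtain ⟨m, rfl⟩ : ∃ m, f1 = m + 1 := ⟨f1 - 1, by omega⟩
            have : pvEven (m+1) (1:Int) 0 = (m+1, 1, 0) := by
              refine pvEven_stop _ _ ?_
              rintro ⟨h', -⟩; exact h' rfl
            rw [h2] at this
            injection this with a b; injection b with b c
            exact hx2 b
          have he1 : PySem.Int.mod x1 2 = 0 := by
            have hex := pvOdd_exit (g+1) x 0
            rw [h1] at hex
            exact (hex (by omega)).resolve_left hx1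
          obtain ⟨m, rfl⟩ : ∃ m, f1 = m + 1 := ⟨f1 - 1, by omega⟩
          have := pvEven_v2_pos m x1 hx1 he1
          rw [h2] at this
          simp at this
          omega
        -- put the two runs together
        rw [htk, htv, ← List.append_assoc,
          pvGroup_cons mk mv (pvTraj f2 x2) hpos hrest hmvpos]
        have hkk : kk = (mk : Int) := by omega
        have hvv : vv = (mv : Int) := by omega
        rw [if_pos (by rw [hkk, hvv]; rcases Nat.lt_or_ge 0 mk with h | h
                       · exact Or.inl (by exact_mod_cast h)
                       · exact Or.inr (by exact_mod_cast (by omega : 0 < mv)))]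
        rw [ih f2 hdec x2 (acc ++ [(kk, vv)]), hkk, hvv]
        simp

-- ===== VERDICT =====
theorem collatz_du_with_cycles_spec : Claim_equal_collatz_du_with_cycles := by
  intro n _
  unfold Spec_collatz_du_with_cycles collatz_du_with_cycles collatz_du_with_cycles_alt
  exact pvMain pvFuel n []
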